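-- pv_equiv track=rewrite | github.com/juanpasaflipz/fact-checkr | backend/app/agent.py | _filter_sources
-- ===== SOURCE A (Python) =====
-- from typing import List
--
-- WHITELIST_SOURCES = [
--     "animalpolitico.com",
--     "aristeguinoticias.com",
--     "eluniversal.com.mx",
--     "proceso.com.mx",
--     "reforma.com",
--     "ine.mx",
--     "banxico.org.mx",
--     "dof.gob.mx"
-- ]
--
-- BLACKLIST_SOURCES = [
--     "deforma.com",  # Satire
--     # "youtube.com",  # Now supported via YouTube scraper with transcription
--     "tiktok.com",   # Hard to parse video content
-- ]
--
-- def _filter_sources(sources: List[str]) -> List[str]: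
--     """Filter sources based on whitelist/blacklist"""
--     filtered = []
--     for url in sources:
--         # Check blacklist first
--         if any(blocked in url.lower() for blocked in BLACKLIST_SOURCES):
--             continue
--         # Prioritize whitelist
--         if any(trusted in url.lower() for trusted in WHITELIST_SOURCES):
--             filtered.insert(0, url)  # Put whitelisted sources first
--         else:
--             filtered.append(url)
--     return filtered[:5]  # Limit to top 5 sources
-- ===== SOURCE B (Python) =====
-- from typing import List
--
-- WHITELIST_SOURCES = [
--     "animalpolitico.com",
--     "aristeguinoticias.com",
--     "eluniversal.com.mx",
--     "proceso.com.mx",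
--     "reforma.com",
--     "ine.mx",
--     "banxico.org.mx",
--     "dof.gob.mx"
-- ]
--
-- BLACKLIST_SOURCES = [
--     "deforma.com",
--     "tiktok.com",
-- ]
--
--
-- def _blocked(url: str) -> bool:
--     u = url.lower()
--     return any(b in u for b in BLACKLIST_SOURCES)
--
--
-- def _trusted(url: str) -> bool:
--     u = url.lower()
--     return any(w in u for w in WHITELIST_SOURCES)
--
--
-- def _filter_sources(sources: List[str]) -> List[str]:
--     kept = [u for u in sources if not _blocked(u)]
--     whitelisted = [u for u in kept if _trusted(u)]
--     others = [u for u in kept if not _trusted(u)]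
--     # whitelisted URLs appear in reverse encounter order (A builds them with insert(0))
--     return (whitelisted[::-1] + others)[:5]
-- ===== Notes on version B (the rewrite author's own statement) =====
-- stated objective: simpler
-- what changed: Replaces A's single loop with insert(0)/append on one accumulator by two declarative filter passes (whitelisted vs others after dropping blacklisted), concatenating reversed-whitelisted with the rest and truncating to 5.
import Mathlib
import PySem

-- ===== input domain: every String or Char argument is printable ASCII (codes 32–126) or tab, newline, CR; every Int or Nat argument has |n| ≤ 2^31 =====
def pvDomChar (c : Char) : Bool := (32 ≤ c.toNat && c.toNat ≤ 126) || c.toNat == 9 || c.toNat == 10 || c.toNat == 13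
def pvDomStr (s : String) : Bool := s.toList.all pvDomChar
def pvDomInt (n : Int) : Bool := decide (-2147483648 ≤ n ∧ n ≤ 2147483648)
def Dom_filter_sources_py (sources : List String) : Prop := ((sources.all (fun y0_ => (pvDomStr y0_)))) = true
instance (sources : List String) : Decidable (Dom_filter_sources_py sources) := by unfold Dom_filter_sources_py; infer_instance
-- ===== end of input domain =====

-- B is a simpler decomposition of A (return value only): two filter passes instead of one loop
-- with insert(0)/append on a single accumulator.

def pvWhitelist : List String :=
  ["animalpolitico.com", "aristeguinoticias.com", "eluniversal.com.mx", "proceso.com.mx",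
   "reforma.com", "ine.mx", "banxico.org.mx", "dof.gob.mx"]

def pvBlacklist : List String := ["deforma.com", "tiktok.com"]

-- ===== PORT A =====
-- A's loop: skip blacklisted; whitelisted go to the front (insert(0)), others are appended.
def filter_sources_py (sources : List String) : List String :=
  (sources.foldl
    (fun filtered url =>
      if pvBlacklist.any (fun blocked => PySem.Str.isIn blocked (PySem.Str.lower url)) then
        filtered
      else if pvWhitelist.any (fun trusted => PySem.Str.isIn trusted (PySem.Str.lower url)) then
        url :: filtered
      else
        filtered ++ [url])
    []).take 5

-- ===== PORT B =====
def pvBlockedB (url : String) : Bool :=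
  let u := PySem.Str.lower url
  pvBlacklist.any (fun b => PySem.Str.isIn b u)

def pvTrustedB (url : String) : Bool :=
  let u := PySem.Str.lower url
  pvWhitelist.any (fun w => PySem.Str.isIn w u)

def filter_sources_py_alt (sources : List String) : List String :=
  let kept := sources.filter (fun u => !pvBlockedB u)
  let whitelisted := kept.filter (fun u => pvTrustedB u)
  let others := kept.filter (fun u => !pvTrustedB u)
  (whitelisted.reverse ++ others).take 5

-- ===== PRECONDITION & SPEC =====
def Spec_filter_sources_py (sources : List String) (out : List String) : Prop := out = filter_sources_py_alt sources
instance (sources : List String) (out : List String) : Decidable (Spec_filter_sources_py sources out) := by unfold Spec_filter_sources_py; infer_instance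

-- ===== CLAIM (what is proved, stated in full; the proofs are below) =====
def Claim_equal_filter_sources_py : Prop := ∀ (sources : List String), Dom_filter_sources_py sources → Spec_filter_sources_py sources (filter_sources_py sources)

-- ===== LEMMAS AND PROOFS =====

-- A's loop invariant: with accumulator r.reverse ++ o, the fold prepends new whitelisted
-- URLs (reversing their encounter order) and appends the others.
theorem pv_loop_inv (l : List String) : ∀ (r o : List String),
    l.foldl
      (fun filtered url =>
        if pvBlacklist.any (fun blocked => PySem.Str.isIn blocked (PySem.Str.lower url)) then
          filtered
        else if pvWhitelist.any (fun trusted => PySem.Str.isIn trusted (PySem.Str.lower url)) then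
          url :: filtered
        else
          filtered ++ [url])
      (r.reverse ++ o)
    = (r ++ (l.filter (fun u => !pvBlockedB u)).filter (fun u => pvTrustedB u)).reverse
      ++ (o ++ (l.filter (fun u => !pvBlockedB u)).filter (fun u => !pvTrustedB u)) := by
  induction l with
  | nil => simp
  | cons x xs ih =>
    intro r o
    by_cases hb : pvBlockedB x
    · have hb' : (pvBlacklist.any fun blocked => PySem.Str.isIn blocked (PySem.Str.lower x)) = true := hb
      rw [List.foldl_cons, if_pos hb', ih r o]
      simp [hb]
    · have hb' : ¬ ((pvBlacklist.any fun blocked => PySem.Str.isIn blocked (PySem.Str.lower x)) = true) := hb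
      by_cases ht : pvTrustedB x
      · have ht' : (pvWhitelist.any fun trusted => PySem.Str.isIn trusted (PySem.Str.lower x)) = true := ht
        rw [List.foldl_cons, if_neg hb', if_pos ht',
          show x :: (r.reverse ++ o) = (r ++ [x]).reverse ++ o by simp, ih (r ++ [x]) o]
        simp [hb, ht]
      · have ht' : ¬ ((pvWhitelist.any fun trusted => PySem.Str.isIn trusted (PySem.Str.lower x)) = true) := ht
        rw [List.foldl_cons, if_neg hb', if_neg ht',
          show (r.reverse ++ o) ++ [x] = r.reverse ++ (o ++ [x]) by simp, ih r (o ++ [x])]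
        simp [hb, ht]

-- ===== VERDICT (by name: the statement is the Claim_ definition above) =====
theorem filter_sources_py_spec : Claim_equal_filter_sources_py := by
  intro sources _
  unfold Spec_filter_sources_py filter_sources_py filter_sources_py_alt
  have h := pv_loop_inv sources [] []
  simp only [List.reverse_nil, List.nil_append] at h
  rw [h]
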